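-- pv_equiv track=rewrite | github.com/Mets3D/Blender-Scripts | sprites_metarig_setup.py | match_param_to_type
-- ===== SOURCE A (Python) =====
-- rig_type_hierarchy = {
-- 	'cloud_base' : {
-- 		'cloud_chain' : {
-- 			'cloud_face_chain' : {
-- 				'cloud_eyelid' : {}
-- 			},
-- 			'cloud_fk_chain' : {
-- 				'cloud_spine' : {},
-- 				'cloud_shoulder' : {},
-- 				'cloud_ik_chain' : {
-- 					'cloud_limb' : {
-- 						'cloud_leg' : {}
-- 					}
-- 				},
-- 				'cloud_physics_chain' : {}
-- 			}
-- 		},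
-- 		'cloud_curve' : {
-- 			'cloud_spline_ik' : {}
-- 		},
-- 		'cloud_aim' : {
-- 			'sprite_fright.eye' : {}
-- 		},
-- 		'cloud_copy' : {},
-- 		'cloud_tweak' : {}
-- 	}
-- }
--
-- def get_rig_type_hierarchy(search, parent_list=[], hierarchy=rig_type_hierarchy):
-- 	"""Build a list consisting of the parent rig types and the rig type itself."""
-- 	for key in hierarchy.keys():
-- 		parent_list.append(key)
-- 		if key==search:
-- 			return parent_list
-- 		found = get_rig_type_hierarchy(search, parent_list, hierarchy[key])
-- 		if not found:
-- 			parent_list.remove(key)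
-- 		else:
-- 			return found
--
-- def match_param_to_type(type_name, param_name):
-- 	"""Determine whether a rigify parameter belongs on a given rig type."""
-- 	matching_types = get_rig_type_hierarchy(type_name, parent_list=[], hierarchy=rig_type_hierarchy)
-- 	if not matching_types: return True
-- 	param_name = param_name.replace("CR_", "")
-- 	for t in matching_types:
-- 		if param_name.startswith(t.replace("cloud_", "")):
-- 			return True
-- 	return False
-- ===== SOURCE B (Python) =====
-- rig_type_hierarchy = {
-- 	'cloud_base' : {
-- 		'cloud_chain' : {
-- 			'cloud_face_chain' : {
-- 				'cloud_eyelid' : {}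
-- 			},
-- 			'cloud_fk_chain' : {
-- 				'cloud_spine' : {},
-- 				'cloud_shoulder' : {},
-- 				'cloud_ik_chain' : {
-- 					'cloud_limb' : {
-- 						'cloud_leg' : {}
-- 					}
-- 				},
-- 				'cloud_physics_chain' : {}
-- 			}
-- 		},
-- 		'cloud_curve' : {
-- 			'cloud_spline_ik' : {}
-- 		},
-- 		'cloud_aim' : {
-- 			'sprite_fright.eye' : {}
-- 		},
-- 		'cloud_copy' : {},
-- 		'cloud_tweak' : {}
-- 	}
-- }
--
-- def _flatten(hierarchy, ancestors):
-- 	"""Flatten the nested hierarchy once into (rig_type, ancestor chain incl. itself) pairs."""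
-- 	table = []
-- 	for key, children in hierarchy.items():
-- 		chain = ancestors + [key]
-- 		table.append((key, chain))
-- 		table.extend(_flatten(children, chain))
-- 	return table
--
-- _TYPE_ANCESTORS = _flatten(rig_type_hierarchy, [])
--
-- def match_param_to_type(type_name, param_name):
-- 	"""Determine whether a rigify parameter belongs on a given rig type."""
-- 	chain = next((c for k, c in _TYPE_ANCESTORS if k == type_name), None)
-- 	if chain is None:
-- 		return True
-- 	stripped = param_name.replace("CR_", "")
-- 	return any(stripped.startswith(t.replace("cloud_", "")) for t in chain)
-- ===== Notes on version B (the rewrite author's own statement) =====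
-- stated objective: alternative
-- what changed: Replaces the per-call recursive DFS with a mutable accumulator list by a table of ancestor chains flattened once at module load, so each call is a flat lookup followed by an any() scan.
import Mathlib
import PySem

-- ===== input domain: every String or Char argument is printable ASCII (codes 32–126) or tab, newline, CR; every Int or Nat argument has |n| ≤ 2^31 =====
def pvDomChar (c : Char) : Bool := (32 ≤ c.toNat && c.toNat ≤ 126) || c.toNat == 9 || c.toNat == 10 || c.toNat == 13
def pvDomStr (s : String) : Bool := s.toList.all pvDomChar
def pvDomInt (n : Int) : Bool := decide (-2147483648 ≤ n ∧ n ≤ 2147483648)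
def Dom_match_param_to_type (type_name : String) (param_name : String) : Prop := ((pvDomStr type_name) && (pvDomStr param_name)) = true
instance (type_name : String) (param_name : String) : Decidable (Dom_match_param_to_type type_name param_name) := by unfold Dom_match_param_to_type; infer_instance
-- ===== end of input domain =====

-- B flattens the nested hierarchy once into a (rig type → ancestor chain) table and makes each
-- call a flat lookup plus an any-scan, instead of A's per-call recursive DFS with an accumulator.

-- The nested Python dict of dicts, encoded as a first-child / next-sibling tree
-- (keys in insertion order: children via `child`, later keys at the same level via `sib`).
inductive Hier where
  | nil : Hier
  | node : String → Hier → Hier → Hier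
deriving DecidableEq, Repr

def rigTypeHierarchy : Hier :=
  .node "cloud_base"
    (.node "cloud_chain"
      (.node "cloud_face_chain"
        (.node "cloud_eyelid" .nil .nil)
        (.node "cloud_fk_chain"
          (.node "cloud_spine" .nil
            (.node "cloud_shoulder" .nil
              (.node "cloud_ik_chain"
                (.node "cloud_limb"
                  (.node "cloud_leg" .nil .nil) .nil)
                (.node "cloud_physics_chain" .nil .nil))))
          .nil))
      (.node "cloud_curve"
        (.node "cloud_spline_ik" .nil .nil)
        (.node "cloud_aim"
          (.node "sprite_fright.eye" .nil .nil)
          (.node "cloud_copy" .nil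
            (.node "cloud_tweak" .nil .nil)))))
    .nil

-- ===== PORT A =====
-- A mutates one shared parent_list: append(key) before the checks, remove(key) when the
-- subtree fails. Every key of the constant hierarchy occurs exactly once, so remove(key)
-- exactly undoes the append; we port this as passing parentList ++ [key] down and keeping
-- the old parentList for the siblings.
def get_rig_type_hierarchy (search : String) (parentList : List String) : Hier → Option (List String)
  | .nil => none
  | .node key children rest =>
    let pl := parentList ++ [key]
    if key == search then some pl
    else
      match get_rig_type_hierarchy search pl children with
      | some found => some found
      | none => get_rig_type_hierarchy search parentList rest

-- the `for t in matching_types: if …: return True` loop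
def matchLoop (paramName : String) : List String → Bool
  | [] => false
  | t :: ts =>
    if PySem.Str.startswith paramName (PySem.Str.replace t "cloud_" "") then true
    else matchLoop paramName ts

def match_param_to_type (type_name : String) (param_name : String) : Bool :=
  match get_rig_type_hierarchy type_name [] rigTypeHierarchy with
  | none => true                          -- `if not matching_types` (None case)
  | some matchingTypes =>
    if matchingTypes.isEmpty then true    -- `if not matching_types` (empty-list case)
    else matchLoop (PySem.Str.replace param_name "CR_" "") matchingTypes

-- ===== PORT B =====
-- `_flatten`: one traversal building (rig type, ancestor chain incl. itself) pairs.
def flattenHier (ancestors : List String) : Hier → List (String × List String)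
  | .nil => []
  | .node key children rest =>
    let chain := ancestors ++ [key]
    (key, chain) :: (flattenHier chain children ++ flattenHier ancestors rest)

def typeAncestors : List (String × List String) := flattenHier [] rigTypeHierarchy

-- `next((c for k, c in _TYPE_ANCESTORS if k == type_name), None)`
def tableLookup (name : String) : List (String × List String) → Option (List String)
  | [] => none
  | (k, c) :: rest => if k == name then some c else tableLookup name rest

def match_param_to_type_alt (type_name : String) (param_name : String) : Bool :=
  match tableLookup type_name typeAncestors with
  | none => true
  | some chain =>
    let stripped := PySem.Str.replace param_name "CR_" ""
    chain.any (fun t => PySem.Str.startswith stripped (PySem.Str.replace t "cloud_" ""))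

-- ===== PRECONDITION & SPEC =====
def Spec_match_param_to_type (type_name : String) (param_name : String) (out : Bool) : Prop := out = match_param_to_type_alt type_name param_name
instance (type_name : String) (param_name : String) (out : Bool) : Decidable (Spec_match_param_to_type type_name param_name out) := by unfold Spec_match_param_to_type; infer_instance

-- ===== CLAIM (what is proved, stated in full; the proofs are below) =====
def Claim_equal_match_param_to_type : Prop := ∀ (type_name : String) (param_name : String), Dom_match_param_to_type type_name param_name → Spec_match_param_to_type type_name param_name (match_param_to_type type_name param_name)

-- ===== LEMMAS AND PROOFS =====

theorem tableLookup_append (name : String) (a b : List (String × List String)) :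
    tableLookup name (a ++ b) =
      match tableLookup name a with
      | some c => some c
      | none => tableLookup name b := by
  induction a with
  | nil => simp [tableLookup]
  | cons p rest ih =>
    obtain ⟨k, c⟩ := p
    simp only [List.cons_append, tableLookup]
    split <;> simp [ih]

-- A's DFS equals lookup in B's flattened table, for any hierarchy and accumulator.
theorem get_eq_lookup (search : String) (parentList : List String) (h : Hier) :
    get_rig_type_hierarchy search parentList h =
      tableLookup search (flattenHier parentList h) := by
  induction h generalizing parentList with
  | nil => rfl
  | node key children rest ihc ihs =>
    simp only [get_rig_type_hierarchy, flattenHier, tableLookup]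
    split
    · rfl
    · rw [tableLookup_append, ihc, ihs]

-- every chain in the table is ancestors ++ [key], hence nonempty
theorem lookup_flatten_ne_nil (search : String) (parentList : List String) (h : Hier)
    (c : List String) :
    tableLookup search (flattenHier parentList h) = some c → c ≠ [] := by
  induction h generalizing parentList with
  | nil => simp [flattenHier, tableLookup]
  | node key children rest ihc ihs =>
    simp only [flattenHier, tableLookup]
    split
    · intro hc
      injection hc with hc
      subst hc
      simp
    · rw [tableLookup_append]
      split
      · rename_i f hf
        intro hc
        injection hc with hc
        subst hc
        exact ihc _ hf
      · exact ihs _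

theorem matchLoop_eq_any (p : String) (ts : List String) :
    matchLoop p ts =
      ts.any (fun t => PySem.Str.startswith p (PySem.Str.replace t "cloud_" "")) := by
  induction ts with
  | nil => rfl
  | cons t ts ih =>
    simp only [matchLoop, List.any_cons]
    split <;> simp_all

-- ===== VERDICT (by name: the statement is the Claim_ definition above) =====
theorem match_param_to_type_spec : Claim_equal_match_param_to_type := by
  intro type_name param_name _
  unfold Spec_match_param_to_type match_param_to_type match_param_to_type_alt
  rw [get_eq_lookup]
  cases hl : tableLookup type_name (flattenHier [] rigTypeHierarchy) with
  | none => simp [typeAncestors, hl]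
  | some chain =>
    have hne := lookup_flatten_ne_nil type_name [] rigTypeHierarchy chain hl
    simp [typeAncestors, hl, List.isEmpty_iff, hne, matchLoop_eq_any]
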